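-- pv_equiv track=rewrite | github.com/sheryloe/BloggerGent | scripts/rewrite_cloudflare_posts_by_date.py | _localize_common_headings
-- ===== SOURCE A (Python) =====
-- def _localize_common_headings(content: str) -> str:
--     replacements = {
--         "<h2>Quick Answer</h2>": "<h2>빠른 결론</h2>",
--         "<h2>At a Glance</h2>": "<h2>핵심 포인트</h2>",
--         "<h2>Final Takeaway</h2>": "<h2>최종 정리</h2>",
--         "<h2>FAQ</h2>": "<h2>자주 묻는 질문</h2>",
--     }
--     localized = content or ""
--     for source, target in replacements.items():
--         localized = localized.replace(source, target)
--     return localized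
-- ===== SOURCE B (Python) =====
-- _TABLE = [
--     ("<h2>Quick Answer</h2>", "<h2>\ube60\ub978 \uacb0\ub860</h2>"),
--     ("<h2>At a Glance</h2>", "<h2>\ud575\uc2ec \ud3ec\uc778\ud2b8</h2>"),
--     ("<h2>Final Takeaway</h2>", "<h2>\ucd5c\uc885 \uc815\ub9ac</h2>"),
--     ("<h2>FAQ</h2>", "<h2>\uc790\uc8fc \ubb3b\ub294 \uc9c8\ubb38</h2>"),
-- ]
--
--
-- def _localize_common_headings(content: str) -> str:
--     # One left-to-right pass: at each position try the table entries in order,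
--     # emit the translation and skip the heading on a match, else copy one char.
--     s = content or ""
--     out = []
--     i = 0
--     n = len(s)
--     while i < n:
--         for src, tgt in _TABLE:
--             if s.startswith(src, i):
--                 out.append(tgt)
--                 i += len(src)
--                 break
--         else:
--             out.append(s[i])
--             i += 1
--     return "".join(out)
-- ===== Notes on version B (the rewrite author's own statement) =====
-- stated objective: alternative
-- what changed: Replaces A's four sequential whole-string str.replace passes with a single left-to-right scan driven by a lookup table that tries all four headings at each position, emitting the translation and skipping the heading on a match.
import Mathlib
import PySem

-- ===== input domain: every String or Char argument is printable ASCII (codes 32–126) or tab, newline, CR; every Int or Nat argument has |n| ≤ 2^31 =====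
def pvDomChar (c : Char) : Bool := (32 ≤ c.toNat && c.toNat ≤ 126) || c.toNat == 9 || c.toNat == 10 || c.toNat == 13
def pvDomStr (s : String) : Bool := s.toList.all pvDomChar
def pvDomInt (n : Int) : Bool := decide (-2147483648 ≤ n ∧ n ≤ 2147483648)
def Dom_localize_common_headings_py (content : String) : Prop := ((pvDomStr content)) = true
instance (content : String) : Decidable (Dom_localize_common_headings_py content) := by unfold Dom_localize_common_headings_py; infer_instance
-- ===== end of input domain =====

-- B replaces A's four sequential whole-string str.replace passes by a single
-- left-to-right table-driven scan (objective: alternative; return value only).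

-- ===== PORT A =====
def localize_common_headings_py (content : String) : String :=
  let localized := if content == "" then "" else content
  let localized := PySem.Str.replace localized "<h2>Quick Answer</h2>" "<h2>빠른 결론</h2>"
  let localized := PySem.Str.replace localized "<h2>At a Glance</h2>" "<h2>핵심 포인트</h2>"
  let localized := PySem.Str.replace localized "<h2>Final Takeaway</h2>" "<h2>최종 정리</h2>"
  PySem.Str.replace localized "<h2>FAQ</h2>" "<h2>자주 묻는 질문</h2>"

-- ===== PORT B =====
def pvSrc1 : List Char := "<h2>Quick Answer</h2>".toList
def pvTgt1 : List Char := "<h2>빠른 결론</h2>".toList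
def pvSrc2 : List Char := "<h2>At a Glance</h2>".toList
def pvTgt2 : List Char := "<h2>핵심 포인트</h2>".toList
def pvSrc3 : List Char := "<h2>Final Takeaway</h2>".toList
def pvTgt3 : List Char := "<h2>최종 정리</h2>".toList
def pvSrc4 : List Char := "<h2>FAQ</h2>".toList
def pvTgt4 : List Char := "<h2>자주 묻는 질문</h2>".toList

-- the while loop of Source B: at each position try the table in order; on a match
-- emit the translation and skip the heading, else copy one character
def pvScan : List Char → List Char
  | [] => []
  | c :: t =>
    if pvSrc1.isPrefixOf (c :: t) then pvTgt1 ++ pvScan (t.drop (pvSrc1.length - 1))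
    else if pvSrc2.isPrefixOf (c :: t) then pvTgt2 ++ pvScan (t.drop (pvSrc2.length - 1))
    else if pvSrc3.isPrefixOf (c :: t) then pvTgt3 ++ pvScan (t.drop (pvSrc3.length - 1))
    else if pvSrc4.isPrefixOf (c :: t) then pvTgt4 ++ pvScan (t.drop (pvSrc4.length - 1))
    else c :: pvScan t
termination_by l => l.length
decreasing_by
  all_goals simp [List.length_drop]

def localize_common_headings_py_alt (content : String) : String :=
  let s := if content == "" then "" else content
  String.ofList (pvScan s.toList)

-- ===== PRECONDITION & SPEC =====
def Spec_localize_common_headings_py (content : String) (out : String) : Prop := out = localize_common_headings_py_alt content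
instance (content : String) (out : String) : Decidable (Spec_localize_common_headings_py content out) := by unfold Spec_localize_common_headings_py; infer_instance

-- ===== CLAIM (what is proved, stated in full; the proofs are below) =====
def Claim_equal_localize_common_headings_py : Prop := ∀ (content : String), Dom_localize_common_headings_py content → Spec_localize_common_headings_py content (localize_common_headings_py content)

-- ===== LEMMAS AND PROOFS =====

-- single-pattern replacement as a structural recursion (spec of PySem.Chars.replace for a nonempty pattern)
def pvRepl (p r : List Char) : List Char → List Char
  | [] => []
  | c :: t => if p.isPrefixOf (c :: t) then r ++ pvRepl p r (t.drop (p.length - 1)) else c :: pvRepl p r t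
termination_by l => l.length
decreasing_by
  all_goals simp [List.length_drop]

theorem pv_prefix_take_of_prefix_append (p u x : List Char) (h : p <+: u ++ x) :
    p.take u.length <+: u := by
  obtain ⟨z, hz⟩ := h
  have h1 : (p ++ z).take u.length = u := by rw [hz]; exact List.take_left
  have h2 : (p ++ z).take u.length = p.take u.length ++ z.take (u.length - p.length) :=
    List.take_append ..
  exact ⟨z.take (u.length - p.length), by rw [← h2, h1]⟩

-- "pvNoOv p u": p cannot match starting anywhere inside u, whatever follows u
def pvNoOv (p u : List Char) : Prop :=
  ∀ k, k < u.length → ¬ (p.take (u.length - k) <+: u.drop k)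

theorem pvNoOv_tail (p : List Char) (c : Char) (u : List Char) (h : pvNoOv p (c :: u)) :
    pvNoOv p u := by
  intro k hk hpre
  exact h (k + 1) (by simp; omega) (by simpa using hpre)

theorem pvRepl_append (p r u x : List Char) (h : pvNoOv p u) :
    pvRepl p r (u ++ x) = u ++ pvRepl p r x := by
  induction u with
  | nil => simp
  | cons c u' ih =>
    have hnm : ¬ p.isPrefixOf (c :: (u' ++ x)) := by
      intro hpf
      have := pv_prefix_take_of_prefix_append p (c :: u') x
        (by simpa using (List.isPrefixOf_iff_prefix.mp hpf))
      exact h 0 (by simp) (by simpa using this)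
    rw [List.cons_append, pvRepl, if_neg hnm, ih (pvNoOv_tail p c u' h)]
    simp

-- if q (aligned at offset k) can match the output of pvRepl p r, it already matched the input
theorem pvSuff (p r q : List Char)
    (hq : ∀ k, k < q.length → ¬ ((q.drop k).take r.length <+: r)) :
    ∀ n (u : List Char), u.length ≤ n → ∀ k, q.drop k <+: pvRepl p r u → q.drop k <+: u := by
  intro n
  induction n with
  | zero =>
    intro u hu k h
    have hnil : u = [] := List.eq_nil_of_length_eq_zero (Nat.le_zero.mp hu)
    subst hnil
    simpa [pvRepl] using h
  | succ n ih =>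
    intro u hu k h
    rcases Nat.lt_or_ge k q.length with hk | hk
    · match u with
      | [] => simpa [pvRepl] using h
      | c :: t =>
        rw [pvRepl] at h
        split at h
        · exact absurd (pv_prefix_take_of_prefix_append _ r _ h) (hq k hk)
        · have hget : q.drop k = q[k] :: q.drop (k + 1) := List.drop_eq_getElem_cons hk
          rw [hget] at h
          obtain ⟨z, hz⟩ := h
          rw [List.cons_append] at hz
          injection hz with hc hz'
          have hlen : t.length ≤ n := by
            have := hu; simp only [List.length_cons] at this; omega
          have htail : q.drop (k + 1) <+: t := ih t hlen (k + 1) ⟨z, hz'⟩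
          rw [hget, hc]
          exact List.cons_prefix_cons.mpr ⟨rfl, htail⟩
    · rw [List.drop_eq_nil_of_le hk]
      exact List.nil_prefix

-- decidable facts about the four literal heading pairs
theorem pv_h1 : pvSrc1 = '<' :: pvSrc1.tail := by decide
theorem pv_h2 : pvSrc2 = '<' :: pvSrc2.tail := by decide
theorem pv_h3 : pvSrc3 = '<' :: pvSrc3.tail := by decide
theorem pv_h4 : pvSrc4 = '<' :: pvSrc4.tail := by decide
theorem pv_n21 : pvNoOv pvSrc2 pvTgt1 := by unfold pvNoOv; decide
theorem pv_n31 : pvNoOv pvSrc3 pvTgt1 := by unfold pvNoOv; decide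
theorem pv_n41 : pvNoOv pvSrc4 pvTgt1 := by unfold pvNoOv; decide
theorem pv_n32 : pvNoOv pvSrc3 pvTgt2 := by unfold pvNoOv; decide
theorem pv_n42 : pvNoOv pvSrc4 pvTgt2 := by unfold pvNoOv; decide
theorem pv_n43 : pvNoOv pvSrc4 pvTgt3 := by unfold pvNoOv; decide
theorem pv_m12 : pvNoOv pvSrc1 pvSrc2.tail := by unfold pvNoOv; decide
theorem pv_m13 : pvNoOv pvSrc1 pvSrc3.tail := by unfold pvNoOv; decide
theorem pv_m14 : pvNoOv pvSrc1 pvSrc4.tail := by unfold pvNoOv; decide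
theorem pv_m23 : pvNoOv pvSrc2 pvSrc3 := by unfold pvNoOv; decide
theorem pv_m24 : pvNoOv pvSrc2 pvSrc4 := by unfold pvNoOv; decide
theorem pv_m34 : pvNoOv pvSrc3 pvSrc4 := by unfold pvNoOv; decide
theorem pv_q21 : ∀ k, k < pvSrc2.length → ¬ ((pvSrc2.drop k).take pvTgt1.length <+: pvTgt1) := by decide
theorem pv_q31 : ∀ k, k < pvSrc3.length → ¬ ((pvSrc3.drop k).take pvTgt1.length <+: pvTgt1) := by decide
theorem pv_q32 : ∀ k, k < pvSrc3.length → ¬ ((pvSrc3.drop k).take pvTgt2.length <+: pvTgt2) := by decide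
theorem pv_q41 : ∀ k, k < pvSrc4.length → ¬ ((pvSrc4.drop k).take pvTgt1.length <+: pvTgt1) := by decide
theorem pv_q42 : ∀ k, k < pvSrc4.length → ¬ ((pvSrc4.drop k).take pvTgt2.length <+: pvTgt2) := by decide
theorem pv_q43 : ∀ k, k < pvSrc4.length → ¬ ((pvSrc4.drop k).take pvTgt3.length <+: pvTgt3) := by decide

theorem pv_split_front (p : List Char) (hph : p = '<' :: p.tail) {c : Char} {t z : List Char}
    (hz : p ++ z = c :: t) : c = '<' ∧ t = p.tail ++ z := by
  rw [hph, List.cons_append] at hz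
  injection hz with hx hy
  exact ⟨hx.symm, hy.symm⟩

theorem pv_drop_tail (p z : List Char) : (p.tail ++ z).drop (p.length - 1) = z := by
  rw [← List.length_tail, List.drop_left]

theorem pv_repl_front (p r y : List Char) (hph : p = '<' :: p.tail) :
    pvRepl p r (p ++ y) = r ++ pvRepl p r y := by
  have hpre : p.isPrefixOf (p ++ y) = true := List.isPrefixOf_iff_prefix.mpr ⟨y, rfl⟩
  conv_lhs => rw [hph, List.cons_append]
  rw [pvRepl, if_pos (by rw [← List.cons_append, ← hph]; exact hpre), ← hph, pv_drop_tail]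

-- a replacement pass cannot create a fresh front occurrence of another heading
theorem pv_protect (p r q : List Char) (hph : q = '<' :: q.tail)
    (hq : ∀ k, k < q.length → ¬ ((q.drop k).take r.length <+: r))
    (c : Char) (t : List Char) (hnot : ¬ q <+: c :: t) : ¬ q <+: c :: pvRepl p r t := by
  intro h
  obtain ⟨z, hz⟩ := h
  obtain ⟨hc, ht⟩ := pv_split_front q hph hz
  have h1 : q.drop 1 <+: pvRepl p r t := by rw [List.drop_one]; exact ⟨z, ht.symm⟩
  have h2 : q.tail <+: t := by
    have := pvSuff p r q hq t.length t le_rfl 1 h1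
    rwa [List.drop_one] at this
  exact hnot (by rw [hph, hc]; exact List.cons_prefix_cons.mpr ⟨rfl, h2⟩)

-- main: the four-pass composition equals the one-pass scan
theorem pv_main : ∀ n (s : List Char), s.length ≤ n →
    pvRepl pvSrc4 pvTgt4 (pvRepl pvSrc3 pvTgt3 (pvRepl pvSrc2 pvTgt2 (pvRepl pvSrc1 pvTgt1 s)))
      = pvScan s := by
  intro n
  induction n with
  | zero =>
    intro s hs
    have hnil : s = [] := List.eq_nil_of_length_eq_zero (Nat.le_zero.mp hs)
    subst hnil
    simp [pvRepl, pvScan]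
  | succ n ih =>
    intro s hs
    match s with
    | [] => simp [pvRepl, pvScan]
    | c :: t =>
      simp only [List.length_cons] at hs
      have hs' : t.length ≤ n := by omega
      by_cases h1 : pvSrc1.isPrefixOf (c :: t) = true
      · obtain ⟨z, hz⟩ := List.isPrefixOf_iff_prefix.mp h1
        obtain ⟨hc, ht⟩ := pv_split_front pvSrc1 pv_h1 hz
        have hzlen : z.length ≤ n := by
          have hlen := congrArg List.length hz
          have h21 : pvSrc1.length = 21 := by decide
          simp only [List.length_append, List.length_cons, h21] at hlen
          omega
        have e1 : pvRepl pvSrc1 pvTgt1 (c :: t) = pvTgt1 ++ pvRepl pvSrc1 pvTgt1 z := by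
          rw [← hz, pv_repl_front pvSrc1 pvTgt1 z pv_h1]
        rw [e1, pvRepl_append pvSrc2 pvTgt2 pvTgt1 _ pv_n21,
          pvRepl_append pvSrc3 pvTgt3 pvTgt1 _ pv_n31,
          pvRepl_append pvSrc4 pvTgt4 pvTgt1 _ pv_n41,
          pvScan, if_pos h1, ht, pv_drop_tail, ih z hzlen]
      · by_cases h2 : pvSrc2.isPrefixOf (c :: t) = true
        · obtain ⟨z, hz⟩ := List.isPrefixOf_iff_prefix.mp h2
          obtain ⟨hc, ht⟩ := pv_split_front pvSrc2 pv_h2 hz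
          have hzlen : z.length ≤ n := by
            have hlen := congrArg List.length hz
            have h20 : pvSrc2.length = 20 := by decide
            simp only [List.length_append, List.length_cons, h20] at hlen
            omega
          have e1 : pvRepl pvSrc1 pvTgt1 (c :: t) = pvSrc2 ++ pvRepl pvSrc1 pvTgt1 z := by
            rw [pvRepl, if_neg h1, ht, pvRepl_append pvSrc1 pvTgt1 pvSrc2.tail z pv_m12, hc]
            conv_rhs => rw [pv_h2, List.cons_append]
          rw [e1, pv_repl_front pvSrc2 pvTgt2 _ pv_h2,
            pvRepl_append pvSrc3 pvTgt3 pvTgt2 _ pv_n32,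
            pvRepl_append pvSrc4 pvTgt4 pvTgt2 _ pv_n42,
            pvScan, if_neg h1, if_pos h2, ht, pv_drop_tail, ih z hzlen]
        · by_cases h3 : pvSrc3.isPrefixOf (c :: t) = true
          · obtain ⟨z, hz⟩ := List.isPrefixOf_iff_prefix.mp h3
            obtain ⟨hc, ht⟩ := pv_split_front pvSrc3 pv_h3 hz
            have hzlen : z.length ≤ n := by
              have hlen := congrArg List.length hz
              have h23 : pvSrc3.length = 23 := by decide
              simp only [List.length_append, List.length_cons, h23] at hlen
              omega
            have e1 : pvRepl pvSrc1 pvTgt1 (c :: t) = pvSrc3 ++ pvRepl pvSrc1 pvTgt1 z := by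
              rw [pvRepl, if_neg h1, ht, pvRepl_append pvSrc1 pvTgt1 pvSrc3.tail z pv_m13, hc]
              conv_rhs => rw [pv_h3, List.cons_append]
            rw [e1, pvRepl_append pvSrc2 pvTgt2 pvSrc3 _ pv_m23,
              pv_repl_front pvSrc3 pvTgt3 _ pv_h3,
              pvRepl_append pvSrc4 pvTgt4 pvTgt3 _ pv_n43,
              pvScan, if_neg h1, if_neg h2, if_pos h3, ht, pv_drop_tail, ih z hzlen]
          · by_cases h4 : pvSrc4.isPrefixOf (c :: t) = true
            · obtain ⟨z, hz⟩ := List.isPrefixOf_iff_prefix.mp h4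
              obtain ⟨hc, ht⟩ := pv_split_front pvSrc4 pv_h4 hz
              have hzlen : z.length ≤ n := by
                have hlen := congrArg List.length hz
                have h12 : pvSrc4.length = 12 := by decide
                simp only [List.length_append, List.length_cons, h12] at hlen
                omega
              have e1 : pvRepl pvSrc1 pvTgt1 (c :: t) = pvSrc4 ++ pvRepl pvSrc1 pvTgt1 z := by
                rw [pvRepl, if_neg h1, ht, pvRepl_append pvSrc1 pvTgt1 pvSrc4.tail z pv_m14, hc]
                conv_rhs => rw [pv_h4, List.cons_append]
              rw [e1, pvRepl_append pvSrc2 pvTgt2 pvSrc4 _ pv_m24,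
                pvRepl_append pvSrc3 pvTgt3 pvSrc4 _ pv_m34,
                pv_repl_front pvSrc4 pvTgt4 _ pv_h4,
                pvScan, if_neg h1, if_neg h2, if_neg h3, if_pos h4, ht, pv_drop_tail, ih z hzlen]
            · have hp2 : ¬ pvSrc2 <+: c :: t := fun hh => h2 (List.isPrefixOf_iff_prefix.mpr hh)
              have hp3 : ¬ pvSrc3 <+: c :: t := fun hh => h3 (List.isPrefixOf_iff_prefix.mpr hh)
              have hp4 : ¬ pvSrc4 <+: c :: t := fun hh => h4 (List.isPrefixOf_iff_prefix.mpr hh)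
              have n2 := pv_protect pvSrc1 pvTgt1 pvSrc2 pv_h2 pv_q21 c t hp2
              have n3a := pv_protect pvSrc1 pvTgt1 pvSrc3 pv_h3 pv_q31 c t hp3
              have n3 := pv_protect pvSrc2 pvTgt2 pvSrc3 pv_h3 pv_q32 c
                (pvRepl pvSrc1 pvTgt1 t) n3a
              have n4a := pv_protect pvSrc1 pvTgt1 pvSrc4 pv_h4 pv_q41 c t hp4
              have n4b := pv_protect pvSrc2 pvTgt2 pvSrc4 pv_h4 pv_q42 c
                (pvRepl pvSrc1 pvTgt1 t) n4a
              have n4 := pv_protect pvSrc3 pvTgt3 pvSrc4 pv_h4 pv_q43 c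
                (pvRepl pvSrc2 pvTgt2 (pvRepl pvSrc1 pvTgt1 t)) n4b
              rw [pvRepl, if_neg h1, pvRepl,
                if_neg (fun hh => n2 (List.isPrefixOf_iff_prefix.mp hh)), pvRepl,
                if_neg (fun hh => n3 (List.isPrefixOf_iff_prefix.mp hh)), pvRepl,
                if_neg (fun hh => n4 (List.isPrefixOf_iff_prefix.mp hh)),
                ih t hs', pvScan, if_neg h1, if_neg h2, if_neg h3, if_neg h4]

-- bridge: PySem.Chars.replace with a nonempty pattern is pvRepl
theorem pv_go_zero (p r l acc : List Char) :
    PySem.Chars.replace.go p r 0 l acc = acc.reverse ++ l := by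
  rw [PySem.Chars.replace.go]

theorem pv_go_nil (p r : List Char) (f : Nat) (acc : List Char) :
    PySem.Chars.replace.go p r (f + 1) [] acc = acc.reverse := by
  rw [PySem.Chars.replace.go]
  omega

theorem pv_go_cons (p r : List Char) (f : Nat) (c : Char) (t acc : List Char) :
    PySem.Chars.replace.go p r (f + 1) (c :: t) acc =
      if p.isPrefixOf (c :: t) then
        PySem.Chars.replace.go p r f (List.drop p.length (c :: t)) (r.reverse ++ acc)
      else PySem.Chars.replace.go p r f t (c :: acc) := by
  rw [PySem.Chars.replace.go]

theorem pv_go_eq (p r : List Char) (hp : p ≠ []) :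
    ∀ fuel (l acc : List Char), l.length ≤ fuel →
      PySem.Chars.replace.go p r fuel l acc = acc.reverse ++ pvRepl p r l := by
  intro fuel
  induction fuel with
  | zero =>
    intro l acc hl
    have hnil : l = [] := List.eq_nil_of_length_eq_zero (Nat.le_zero.mp hl)
    subst hnil
    rw [pv_go_zero]
    simp [pvRepl]
  | succ f ih =>
    intro l acc hl
    match l with
    | [] => rw [pv_go_nil]; simp [pvRepl]
    | c :: t =>
      rw [pv_go_cons]
      simp only [List.length_cons] at hl
      by_cases hm : p.isPrefixOf (c :: t) = true
      · have hd : List.drop p.length (c :: t) = t.drop (p.length - 1) := by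
          have hgt : p.length = (p.length - 1) + 1 := by
            cases p with
            | nil => exact absurd rfl hp
            | cons a q => simp
          conv_lhs => rw [hgt]
          rw [List.drop_succ_cons]
        have hlen : (t.drop (p.length - 1)).length ≤ f := by
          simp only [List.length_drop]
          omega
        rw [if_pos hm, hd, ih _ _ hlen, pvRepl, if_pos hm]
        simp
      · rw [if_neg hm, ih _ _ (by omega), pvRepl, if_neg hm]
        simp

theorem pv_replace_eq (s p r : List Char) (hp : p ≠ []) :
    PySem.Chars.replace s p r = pvRepl p r s := by
  rw [PySem.Chars.replace, if_neg (by simp [List.isEmpty_iff, hp])]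
  simpa using pv_go_eq p r hp s.length s [] le_rfl

theorem pv_str (s : String) :
    PySem.Str.replace (PySem.Str.replace (PySem.Str.replace (PySem.Str.replace s
        "<h2>Quick Answer</h2>" "<h2>빠른 결론</h2>")
        "<h2>At a Glance</h2>" "<h2>핵심 포인트</h2>")
        "<h2>Final Takeaway</h2>" "<h2>최종 정리</h2>")
        "<h2>FAQ</h2>" "<h2>자주 묻는 질문</h2>"
      = String.ofList (pvScan s.toList) := by
  simp only [PySem.Str.replace, String.toList_ofList]
  rw [pv_replace_eq _ _ _ (by decide), pv_replace_eq _ _ _ (by decide),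
    pv_replace_eq _ _ _ (by decide), pv_replace_eq _ _ _ (by decide)]
  rw [show ("<h2>Quick Answer</h2>" : String).toList = pvSrc1 from rfl,
    show ("<h2>빠른 결론</h2>" : String).toList = pvTgt1 from rfl,
    show ("<h2>At a Glance</h2>" : String).toList = pvSrc2 from rfl,
    show ("<h2>핵심 포인트</h2>" : String).toList = pvTgt2 from rfl,
    show ("<h2>Final Takeaway</h2>" : String).toList = pvSrc3 from rfl,
    show ("<h2>최종 정리</h2>" : String).toList = pvTgt3 from rfl,
    show ("<h2>FAQ</h2>" : String).toList = pvSrc4 from rfl,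
    show ("<h2>자주 묻는 질문</h2>" : String).toList = pvTgt4 from rfl,
    pv_main s.toList.length s.toList le_rfl]

-- ===== VERDICT (by name: the statement is the Claim_ definition above) =====
theorem localize_common_headings_py_spec : Claim_equal_localize_common_headings_py := by
  intro content _
  exact pv_str (if content == "" then "" else content)
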